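-- pv_equiv track=rewrite | github.com/yofn/pyacm | contests/ccpc20cc/a3.py | f
-- ===== SOURCE A (Python) =====
-- pl = [648,328,198,88,28, 6,1]
--
-- rl = [388,198,128,58,28,18,8]
--
-- def f(n):
--     awards = [0]
--     yuan   = [n]
--     for i in range(7):
--         na = []
--         ny = []
--         for j in range(len(yuan)):
--             if yuan[j]>=pl[i]:
--                 na.append(awards[j]+rl[i])
--                 ny.append(yuan[j]-pl[i])
--         awards = awards + na
--         yuan   = yuan   + ny
--     return max(awards) + n*10
-- ===== SOURCE B (Python) =====
-- pl = [648,328,198,88,28, 6,1]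
--
-- rl = [388,198,128,58,28,18,8]
--
-- def f(n):
--     def g(i, budget):
--         if i == 7:
--             return 0
--         best = g(i + 1, budget)          # skip item i (always available)
--         if budget >= pl[i]:
--             best = max(best, rl[i] + g(i + 1, budget - pl[i]))  # take item i
--         return best
--     return g(0, n) + n * 10
-- ===== Notes on version B (the rewrite author's own statement) =====
-- stated objective: alternative
-- what changed: Replaced A's breadth-first growing frontier of (award, money-left) state lists with a depth-first include/exclude recursion over the item index that returns the best award directly, building no lists.
import Mathlib
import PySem

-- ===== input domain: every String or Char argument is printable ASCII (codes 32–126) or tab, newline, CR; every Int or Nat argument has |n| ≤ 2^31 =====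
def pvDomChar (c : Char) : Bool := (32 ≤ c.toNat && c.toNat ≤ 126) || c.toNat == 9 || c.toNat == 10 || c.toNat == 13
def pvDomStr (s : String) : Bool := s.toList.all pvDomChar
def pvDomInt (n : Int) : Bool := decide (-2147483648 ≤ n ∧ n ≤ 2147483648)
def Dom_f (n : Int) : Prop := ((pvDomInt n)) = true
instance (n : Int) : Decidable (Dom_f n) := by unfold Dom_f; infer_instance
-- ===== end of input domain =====

-- B replaces A's breadth-first frontier lists of (award, money-left) states by a
-- depth-first include/exclude recursion over the 7 items (objective: alternative algorithm).

-- ===== PORT A =====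
def plC : List Int := [648, 328, 198, 88, 28, 6, 1]
def rlC : List Int := [388, 198, 128, 58, 28, 18, 8]

-- literal port of A; every index (j into awards/yuan, i into pl/rl) is in range in the
-- Python, so pyGetD's default is never hit; max(awards) is on a provably nonempty list
-- (it starts as [0] and only grows), so the .getD 0 after max? is never hit either.
def f (n : Int) : Int :=
  let awards : List Int := [0]
  let yuan : List Int := [n]
  let st :=
    (PySem.List.pyRange 0 7 1).foldl (fun (st : List Int × List Int) i =>
      let inner :=
        (PySem.List.pyRange 0 (st.2.length : Int) 1).foldl (fun (acc : List Int × List Int) j =>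
          if PySem.List.pyGetD st.2 j 0 ≥ PySem.List.pyGetD plC i 0 then
            (acc.1 ++ [PySem.List.pyGetD st.1 j 0 + PySem.List.pyGetD rlC i 0],
             acc.2 ++ [PySem.List.pyGetD st.2 j 0 - PySem.List.pyGetD plC i 0])
          else acc) ([], [])
      (st.1 ++ inner.1, st.2 ++ inner.2)) (awards, yuan)
  (PySem.List.max? st.1 (fun x => x)).getD 0 + n * 10

-- ===== PORT B =====
-- Source B's g(i, budget) recurses on i = 0..7 over the fixed items pl[i], rl[i];
-- here that index recursion is taken structurally over the remaining (price, reward) pairs.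
def gB : List (Int × Int) → Int → Int
  | [], _ => 0
  | (p, r) :: rest, b =>
      let best := gB rest b
      if b ≥ p then max best (r + gB rest (b - p)) else best

def f_alt (n : Int) : Int := gB (plC.zip rlC) n + n * 10

-- ===== PRECONDITION & SPEC =====
def Spec_f (n : Int) (out : Int) : Prop := out = f_alt n
instance (n : Int) (out : Int) : Decidable (Spec_f n out) := by unfold Spec_f; infer_instance

-- ===== CLAIM (what is proved, stated in full; the proofs are below) =====
def Claim_equal_f : Prop := ∀ (n : Int), Dom_f n → Spec_f n (f n)

-- ===== LEMMAS AND PROOFS =====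

-- one frontier step of A, on the zipped (award, money-left) state
def stepP (p r : Int) (zs : List (Int × Int)) : List (Int × Int) :=
  zs ++ (zs.filter (fun z => p ≤ z.2)).map (fun z => (z.1 + r, z.2 - p))

def runA (zs : List (Int × Int)) (items : List (Int × Int)) : List (Int × Int) :=
  items.foldl (fun acc pr => stepP pr.1 pr.2 acc) zs

-- running max of a projection over the frontier
def mfold (m : Int) (zs : List (Int × Int)) (φ : Int × Int → Int) : Int :=
  zs.foldl (fun m z => max m (φ z)) m

theorem pairAcc (p r : Int) :
    ∀ (zs : List (Int × Int)) (na ny : List Int),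
      zs.foldl (fun (acc : List Int × List Int) z =>
          if p ≤ z.2 then (acc.1 ++ [z.1 + r], acc.2 ++ [z.2 - p]) else acc) (na, ny)
        = (na ++ (zs.filter (fun z => p ≤ z.2)).map (fun z => z.1 + r),
           ny ++ (zs.filter (fun z => p ≤ z.2)).map (fun z => z.2 - p)) := by
  intro zs
  induction zs with
  | nil => intro na ny; simp
  | cons z t ih =>
      intro na ny
      by_cases h : p ≤ z.2
      · simp [List.foldl, h, ih]
      · simp [List.foldl, h, ih]

-- A's inner loop (index j over the parallel awards/yuan lists), on the zipped state
theorem innerLoop (p r : Int) (zs : List (Int × Int)) :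
    (PySem.List.pyRange 0 ((zs.map Prod.snd).length : Int) 1).foldl
        (fun (acc : List Int × List Int) j =>
          if PySem.List.pyGetD (zs.map Prod.snd) j 0 ≥ p then
            (acc.1 ++ [PySem.List.pyGetD (zs.map Prod.fst) j 0 + r],
             acc.2 ++ [PySem.List.pyGetD (zs.map Prod.snd) j 0 - p])
          else acc) ([], [])
      = ((zs.filter (fun z => p ≤ z.2)).map (fun z => z.1 + r),
         (zs.filter (fun z => p ≤ z.2)).map (fun z => z.2 - p)) := by
  have hb : ((zs.map Prod.snd).length : Int) = (zs.length : Int) := by simp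
  rw [hb]
  have key := PySem.List.foldl_congr_mem (PySem.List.pyRange 0 (zs.length : Int) 1)
      (fun (acc : List Int × List Int) (j : Int) =>
        if PySem.List.pyGetD (zs.map Prod.snd) j 0 ≥ p then
          (acc.1 ++ [PySem.List.pyGetD (zs.map Prod.fst) j 0 + r],
           acc.2 ++ [PySem.List.pyGetD (zs.map Prod.snd) j 0 - p])
        else acc)
      (fun (acc : List Int × List Int) (j : Int) =>
        (fun (acc : List Int × List Int) (z : Int × Int) =>
          if p ≤ z.2 then (acc.1 ++ [z.1 + r], acc.2 ++ [z.2 - p]) else acc) acc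
          (PySem.List.pyGetD zs j ((0 : Int), (0 : Int))))
      ([], [])
      (by
        intro acc j hj
        rw [PySem.List.mem_pyRange_one] at hj
        have h0 : (0 : Int) ≤ j := hj.1
        have h1 : j < ((zs.length : Nat) : Int) := hj.2
        have hf : PySem.List.pyGetD (zs.map Prod.fst) j 0
            = (PySem.List.pyGetD zs j ((0 : Int), (0 : Int))).1 := by
          rw [PySem.List.pyGetD_eq_getElem _ _ h0 (by simpa using h1),
              PySem.List.pyGetD_eq_getElem _ _ h0 h1]
          simp
        have hs : PySem.List.pyGetD (zs.map Prod.snd) j 0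
            = (PySem.List.pyGetD zs j ((0 : Int), (0 : Int))).2 := by
          rw [PySem.List.pyGetD_eq_getElem _ _ h0 (by simpa using h1),
              PySem.List.pyGetD_eq_getElem _ _ h0 h1]
          simp
        simp only [hf, hs, ge_iff_le])
  rw [key,
      PySem.List.foldl_pyRange_zero_pyGetD' zs ((0 : Int), (0 : Int))
        (fun (acc : List Int × List Int) (z : Int × Int) =>
          if p ≤ z.2 then (acc.1 ++ [z.1 + r], acc.2 ++ [z.2 - p]) else acc) ([], [])]
  simpa using pairAcc p r zs [] []

-- A's outer loop, on the zipped state: it is runA over the indexed items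
theorem outerFold :
    ∀ (l : List Int) (zs : List (Int × Int)),
      l.foldl (fun (st : List Int × List Int) i =>
        let inner :=
          (PySem.List.pyRange 0 (st.2.length : Int) 1).foldl (fun (acc : List Int × List Int) j =>
            if PySem.List.pyGetD st.2 j 0 ≥ PySem.List.pyGetD plC i 0 then
              (acc.1 ++ [PySem.List.pyGetD st.1 j 0 + PySem.List.pyGetD rlC i 0],
               acc.2 ++ [PySem.List.pyGetD st.2 j 0 - PySem.List.pyGetD plC i 0])
            else acc) ([], [])
        (st.1 ++ inner.1, st.2 ++ inner.2)) (zs.map Prod.fst, zs.map Prod.snd)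
      = ((l.foldl (fun acc i => stepP (PySem.List.pyGetD plC i 0) (PySem.List.pyGetD rlC i 0) acc) zs).map Prod.fst,
         (l.foldl (fun acc i => stepP (PySem.List.pyGetD plC i 0) (PySem.List.pyGetD rlC i 0) acc) zs).map Prod.snd) := by
  intro l
  induction l with
  | nil => intro zs; simp
  | cons i t ih =>
      intro zs
      simp only [List.foldl]
      rw [innerLoop (PySem.List.pyGetD plC i 0) (PySem.List.pyGetD rlC i 0) zs]
      have h1 : (zs.map Prod.fst ++
            ((zs.filter (fun z => PySem.List.pyGetD plC i 0 ≤ z.2)).map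
              (fun z => z.1 + PySem.List.pyGetD rlC i 0)),
          zs.map Prod.snd ++
            ((zs.filter (fun z => PySem.List.pyGetD plC i 0 ≤ z.2)).map
              (fun z => z.2 - PySem.List.pyGetD plC i 0)))
          = ((stepP (PySem.List.pyGetD plC i 0) (PySem.List.pyGetD rlC i 0) zs).map Prod.fst,
             (stepP (PySem.List.pyGetD plC i 0) (PySem.List.pyGetD rlC i 0) zs).map Prod.snd) := by
        simp [stepP, Function.comp]
      rw [h1, ih]

theorem foldl_max_dist (step : Int → Int × Int → Int)
    (h : ∀ a b z, step (max a b) z = max a (step b z)) :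
    ∀ (zs : List (Int × Int)) (a b : Int),
      zs.foldl step (max a b) = max a (zs.foldl step b) := by
  intro zs
  induction zs with
  | nil => intro a b; simp
  | cons z t ih => intro a b; simp only [List.foldl, h a b z, ih]

-- folding a second conditional running max over the same list fuses into one running max
theorem combineC (φ ψ : Int × Int → Int) (c : Int × Int → Bool) :
    ∀ (zs : List (Int × Int)) (m : Int),
      zs.foldl (fun m z => if c z then max m (ψ z) else m) (mfold m zs φ)
        = mfold m zs (fun z => if c z then max (φ z) (ψ z) else φ z) := by
  have hφ : ∀ a b z, max (max a b) (φ z) = max a (max b (φ z)) := fun a b z => max_assoc a b (φ z)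
  have hg : ∀ (a b : Int) (z : Int × Int),
      (if c z then max (max a b) (ψ z) else max a b) = max a (if c z then max b (ψ z) else b) := by
    intro a b z
    by_cases h : c z <;> simp [h, max_assoc]
  intro zs
  induction zs with
  | nil => intro m; simp [mfold]
  | cons z t ih =>
      intro m
      simp only [mfold, List.foldl]
      have e1 : List.foldl (fun m z => max m (φ z)) (max m (φ z)) t
          = max (φ z) (List.foldl (fun m z => max m (φ z)) m t) := by
        rw [max_comm m (φ z)]
        exact foldl_max_dist _ hφ t (φ z) m
      rw [e1]
      have e2 : (if c z then max (max (φ z) (List.foldl (fun m z => max m (φ z)) m t)) (ψ z)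
            else max (φ z) (List.foldl (fun m z => max m (φ z)) m t))
          = max (if c z then max (φ z) (ψ z) else φ z)
              (List.foldl (fun m z => max m (φ z)) m t) := by
        by_cases h : c z <;> simp [h, max_right_comm]
      rw [e2]
      rw [foldl_max_dist _ hg t _ _]
      have := ih m
      simp only [mfold] at this
      rw [this]
      have e3 : max (if c z then max (φ z) (ψ z) else φ z)
            (List.foldl (fun m w => max m (if c w then max (φ w) (ψ w) else φ w)) m t)
          = List.foldl (fun m w => max m (if c w then max (φ w) (ψ w) else φ w))
              (max m (if c z then max (φ z) (ψ z) else φ z)) t := by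
        rw [max_comm m _]
        exact (foldl_max_dist _ (fun a b w => max_assoc a b _) t _ m).symm
      rw [e3]

-- the heart: the max award over A's final frontier equals B's include/exclude recursion
theorem coreL :
    ∀ (items : List (Int × Int)) (m : Int) (zs : List (Int × Int)),
      mfold m (runA zs items) (fun z => z.1)
        = mfold m zs (fun z => z.1 + gB items z.2) := by
  intro items
  induction items with
  | nil => intro m zs; simp [gB, mfold, runA]
  | cons pr rest ih =>
      intro m zs
      obtain ⟨p, r⟩ := pr
      have hrun : runA zs ((p, r) :: rest) = runA (stepP p r zs) rest := by
        simp [runA]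
      rw [hrun, ih m (stepP p r zs)]
      simp only [stepP, mfold, List.foldl_append, List.foldl_map, List.foldl_filter]
      have hcomb := combineC (fun z => z.1 + gB rest z.2)
          (fun z => (z.1 + r) + gB rest (z.2 - p)) (fun z => decide (p ≤ z.2)) zs m
      simp only [mfold] at hcomb
      rw [hcomb]
      apply PySem.List.foldl_congr_mem
      intro acc z _
      by_cases h : p ≤ z.2
      · simp only [gB, ge_iff_le, h, decide_true, if_true]
        rw [← max_add_add_left]
        ring_nf
      · simp [gB, h]

theorem gB_nonneg : ∀ (items : List (Int × Int)) (b : Int), 0 ≤ gB items b := by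
  intro items
  induction items with
  | nil => intro b; simp [gB]
  | cons z t ih =>
      intro b
      obtain ⟨p, r⟩ := z
      simp only [gB]
      split
      · exact le_trans (ih b) (le_max_left _ _)
      · exact ih b

-- the initial state survives at the head of the frontier, so awards is nonempty with head 0
theorem runA_cons :
    ∀ (items : List (Int × Int)) (z : Int × Int) (zs : List (Int × Int)),
      ∃ t, runA (z :: zs) items = z :: t := by
  intro items
  induction items with
  | nil => intro z zs; exact ⟨zs, rfl⟩
  | cons pr rest ih =>
      intro z zs
      have h : runA (z :: zs) (pr :: rest)
          = runA (z :: (zs ++ ((z :: zs).filter (fun w => pr.1 ≤ w.2)).map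
              (fun w => (w.1 + pr.2, w.2 - pr.1)))) rest := by
        simp [runA, stepP]
      rw [h]
      exact ih _ _

-- indexing pl/rl over i = 0..6 is folding over the zipped constant items
theorem idxToItems : ∀ (zs : List (Int × Int)),
    List.foldl (fun acc i => stepP (PySem.List.pyGetD plC i 0) (PySem.List.pyGetD rlC i 0) acc)
      zs [0, 1, 2, 3, 4, 5, 6] = runA zs (plC.zip rlC) := by
  intro zs
  have hz : plC.zip rlC = [(648, 388), (328, 198), (198, 128), (88, 58), (28, 28), (6, 18), (1, 8)] := by
    decide
  rw [hz]
  simp only [runA, List.foldl]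
  norm_num [show PySem.List.pyGetD plC 0 0 = 648 from by decide,
    show PySem.List.pyGetD rlC 0 0 = 388 from by decide,
    show PySem.List.pyGetD plC 1 0 = 328 from by decide,
    show PySem.List.pyGetD rlC 1 0 = 198 from by decide,
    show PySem.List.pyGetD plC 2 0 = 198 from by decide,
    show PySem.List.pyGetD rlC 2 0 = 128 from by decide,
    show PySem.List.pyGetD plC 3 0 = 88 from by decide,
    show PySem.List.pyGetD rlC 3 0 = 58 from by decide,
    show PySem.List.pyGetD plC 4 0 = 28 from by decide,
    show PySem.List.pyGetD rlC 4 0 = 28 from by decide,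
    show PySem.List.pyGetD plC 5 0 = 6 from by decide,
    show PySem.List.pyGetD rlC 5 0 = 18 from by decide,
    show PySem.List.pyGetD plC 6 0 = 1 from by decide,
    show PySem.List.pyGetD rlC 6 0 = 8 from by decide]

theorem f_eq_f_alt : ∀ (n : Int), f n = f_alt n := by
  intro n
  unfold f f_alt
  have hr : PySem.List.pyRange 0 7 1 = [0, 1, 2, 3, 4, 5, 6] := by decide
  have hinit : (([0] : List Int), ([n] : List Int))
      = (([(0, n)] : List (Int × Int)).map Prod.fst, ([(0, n)] : List (Int × Int)).map Prod.snd) := by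
    simp
  simp only [hr, hinit]
  rw [outerFold [0, 1, 2, 3, 4, 5, 6] [(0, n)], idxToItems [(0, n)]]
  obtain ⟨t, ht⟩ := runA_cons (plC.zip rlC) (0, n) []
  rw [ht]
  have hmax : PySem.List.max? (((0, n) :: t).map Prod.fst) (fun x => x)
      = some (List.foldl max 0 (t.map Prod.fst)) := by
    simp only [List.map]
    exact PySem.List.max?_id_cons 0 (t.map Prod.fst)
  rw [hmax]
  simp only [Option.getD]
  have h1 : List.foldl max 0 (t.map Prod.fst) = mfold 0 ((0, n) :: t) (fun z => z.1) := by
    simp [mfold, List.foldl, List.foldl_map]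
  rw [h1, ← ht, coreL (plC.zip rlC) 0 [(0, n)]]
  simp [mfold, max_eq_right (gB_nonneg (plC.zip rlC) n)]

-- ===== VERDICT (by name: the statement is the Claim_ definition above) =====
theorem f_spec : Claim_equal_f := by
  intro n _
  unfold Spec_f
  exact f_eq_f_alt n
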